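-- pv_equiv track=rewrite | github.com/no7hings/Lynxi | workspace/module/windows-python-2.7.x/LxScheme/shmCore.py | _getChangedFileMethod
-- ===== SOURCE A (Python) =====
-- def _getChangedFileMethod(sourceTimestamp, targetTimestamp):
--     lis = []
--
--     for localOsFile, sourceTime in sourceTimestamp.items():
--         if targetTimestamp.__contains__(localOsFile):
--             targetTime = targetTimestamp[localOsFile]
--             if sourceTime != targetTime:
--                 lis.append(localOsFile)
--         #
--         else:
--             lis.append(localOsFile)
--
--     return lis
-- ===== SOURCE B (Python) =====
-- def _getChangedFileMethod(sourceTimestamp, targetTimestamp):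
--     changed = set(sourceTimestamp.items()) - set(targetTimestamp.items())
--     return [k for k, v in sourceTimestamp.items() if (k, v) in changed]
-- ===== Notes on version B (the rewrite author's own statement) =====
-- stated objective: idiomatic
-- what changed: Replaces the per-entry contains/lookup branching with a single set difference over (key,value) item pairs, projecting keys in source order.
import Mathlib
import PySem

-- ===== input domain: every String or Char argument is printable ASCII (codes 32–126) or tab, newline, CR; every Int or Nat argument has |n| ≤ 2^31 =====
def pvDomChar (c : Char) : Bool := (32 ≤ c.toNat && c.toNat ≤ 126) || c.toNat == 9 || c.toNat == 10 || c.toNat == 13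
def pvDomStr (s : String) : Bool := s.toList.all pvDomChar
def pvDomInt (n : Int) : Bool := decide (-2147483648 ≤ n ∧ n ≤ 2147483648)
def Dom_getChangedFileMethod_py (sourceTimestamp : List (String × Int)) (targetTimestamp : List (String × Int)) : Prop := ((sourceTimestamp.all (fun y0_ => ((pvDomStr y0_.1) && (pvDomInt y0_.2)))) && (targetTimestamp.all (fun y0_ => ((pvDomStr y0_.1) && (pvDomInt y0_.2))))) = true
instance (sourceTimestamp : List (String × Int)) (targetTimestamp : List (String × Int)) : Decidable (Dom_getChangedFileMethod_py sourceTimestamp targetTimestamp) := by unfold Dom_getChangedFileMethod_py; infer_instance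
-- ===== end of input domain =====

-- B replaces A's per-entry contains/lookup branching with a set difference over item pairs (idiomatic, same cost).


-- ===== PORT A =====
-- the dict arguments are modelled as PySem.Dict built from the association lists (Python dict semantics)
def getChangedFileMethod_py (sourceTimestamp : List (String × Int)) (targetTimestamp : List (String × Int)) : List String :=
  let sd := PySem.Dict.ofList sourceTimestamp
  let td := PySem.Dict.ofList targetTimestamp
  sd.items.foldl (fun lis p =>
    if td.contains p.1 then
      -- targetTime = targetTimestamp[localOsFile]; lookup succeeds under the contains guard
      if p.2 ≠ (td.get? p.1).getD 0 then lis ++ [p.1] else lis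
    else lis ++ [p.1]) []

-- ===== PORT B =====
def getChangedFileMethod_py_alt (sourceTimestamp : List (String × Int)) (targetTimestamp : List (String × Int)) : List String :=
  let sd := PySem.Dict.ofList sourceTimestamp
  let changed := PySem.Set.diff (PySem.Set.ofList sd.items)
                                (PySem.Set.ofList (PySem.Dict.ofList targetTimestamp).items)
  (sd.items.filter (fun p => PySem.Set.contains changed p)).map Prod.fst

-- ===== PRECONDITION & SPEC =====
def Spec_getChangedFileMethod_py (sourceTimestamp : List (String × Int)) (targetTimestamp : List (String × Int)) (out : List String) : Prop := out = getChangedFileMethod_py_alt sourceTimestamp targetTimestamp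
instance (sourceTimestamp : List (String × Int)) (targetTimestamp : List (String × Int)) (out : List String) : Decidable (Spec_getChangedFileMethod_py sourceTimestamp targetTimestamp out) := by unfold Spec_getChangedFileMethod_py; infer_instance

-- ===== CLAIM (what is proved, stated in full; the proofs are below) =====
def Claim_equal_getChangedFileMethod_py : Prop := ∀ (sourceTimestamp : List (String × Int)) (targetTimestamp : List (String × Int)), Dom_getChangedFileMethod_py sourceTimestamp targetTimestamp → Spec_getChangedFileMethod_py sourceTimestamp targetTimestamp (getChangedFileMethod_py sourceTimestamp targetTimestamp)

-- ===== LEMMAS AND PROOFS =====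

-- membership in the target dict's items, rephrased through get?
theorem mem_items_iff_get? (t : List (String × Int)) (p : String × Int) :
    p ∈ (PySem.Dict.ofList t).items ↔ (PySem.Dict.ofList t).get? p.1 = some p.2 := by
  exact (PySem.Dict.get?_eq_some_iff_mem_items _ _ _ (PySem.Dict.nodup_keys_ofList t)).symm

-- ===== VERDICT (by name: the statement is the Claim_ definition above) =====
theorem getChangedFileMethod_py_spec : Claim_equal_getChangedFileMethod_py := by
  intro s t _
  unfold Spec_getChangedFileMethod_py getChangedFileMethod_py getChangedFileMethod_py_alt
  simp only []
  set sd := PySem.Dict.ofList s with hsd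
  set td := PySem.Dict.ofList t with htd
  -- turn A's fold into a filter-map
  have hA : sd.items.foldl (fun lis p =>
      if td.contains p.1 then
        if p.2 ≠ (td.get? p.1).getD 0 then lis ++ [p.1] else lis
      else lis ++ [p.1]) [] =
      (sd.items.filter (fun p => !td.contains p.1 || p.2 ≠ (td.get? p.1).getD 0)).map Prod.fst := by
    have h := PySem.List.foldl_append_if
      (l := sd.items) (acc := ([] : List String))
      (p := fun p => !td.contains p.1 || p.2 ≠ (td.get? p.1).getD 0) (f := Prod.fst)
    simp only [List.nil_append] at h
    rw [← h]
    apply PySem.List.foldl_congr_mem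
    intro acc p _
    by_cases h1 : td.contains p.1 <;> by_cases h2 : p.2 = (td.get? p.1).getD 0 <;>
      simp [h1, h2]
  rw [hA]
  congr 1
  apply List.filter_congr
  intro p hp
  have hcont : PySem.Set.contains
      (PySem.Set.diff (PySem.Set.ofList sd.items) (PySem.Set.ofList td.items)) p
      = decide (p ∉ td.items) := by
    have hmem : p ∈ PySem.Set.diff (PySem.Set.ofList sd.items) (PySem.Set.ofList td.items) ↔
        p ∉ td.items := by
      rw [PySem.Set.mem_diff, PySem.Set.mem_ofList, PySem.Set.mem_ofList]
      simp [hp]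
    rw [Bool.eq_iff_iff]
    simp only [decide_eq_true_eq, PySem.Set.contains_iff]
    exact hmem
  rw [hcont]
  by_cases h1 : td.contains p.1
  · have h1' : (td.get? p.1).isSome = true := by
      rw [← PySem.Dict.contains_eq_isSome_get?]; exact h1
    rcases Option.isSome_iff_exists.mp h1' with ⟨w, hw⟩
    have hiff : p ∈ td.items ↔ p.2 = w := by
      rw [mem_items_iff_get? t p, ← htd, hw]
      constructor
      · intro h; exact (Option.some_inj.mp h).symm
      · intro h; rw [h]
    by_cases h2 : p.2 = w <;> simp [h1, hw, h2, hiff]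
  · have : p ∉ td.items := fun hc => by
      have := (mem_items_iff_get? t p).mp (htd ▸ hc)
      rw [htd, PySem.Dict.contains_eq_isSome_get?, this] at h1; simp at h1
    simp [h1, this]
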